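-- pv_equiv track=rewrite | github.com/Snowwpanda/adventofcode | adventofcode22/7/7.py | DFS
-- ===== SOURCE A (Python) =====
-- def DFS(dir, direct_files_map, adj_map, total_files_map):
--     total = 0
--     if dir in total_files_map:
--         return total_files_map[dir]
--
--     if dir in direct_files_map:
--         total += direct_files_map[dir]
--     if dir in adj_map:
--         for subdir in adj_map[dir]:
--             total += DFS(subdir, direct_files_map, adj_map, total_files_map)
--
--     total_files_map[dir] = total
--     return total
-- ===== SOURCE B (Python) =====
-- def DFS(dir, direct_files_map, adj_map, total_files_map):
--     # Iterative breadth-first frontier walk with path-multiplicity counts;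
--     # return-value equivalence only: B does not mutate total_files_map (A fills it).
--     total = 0
--     frontier = {dir: 1}
--     while frontier:
--         nxt = {}
--         for v, c in frontier.items():
--             if v in total_files_map:
--                 total += c * total_files_map[v]
--             else:
--                 total += c * direct_files_map.get(v, 0)
--                 for ch in adj_map.get(v, []):
--                     nxt[ch] = nxt.get(ch, 0) + c
--         frontier = nxt
--     return total
-- ===== Notes on version B (the rewrite author's own statement) =====
-- stated objective: alternative
-- what changed: Replaces the memoizing recursive DFS with an iterative level-by-level frontier walk that carries path-multiplicity counts in a dict and sums contributions directly; B never writes to total_files_map (return-value equivalence; A fills the memo in place).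
import Mathlib
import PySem

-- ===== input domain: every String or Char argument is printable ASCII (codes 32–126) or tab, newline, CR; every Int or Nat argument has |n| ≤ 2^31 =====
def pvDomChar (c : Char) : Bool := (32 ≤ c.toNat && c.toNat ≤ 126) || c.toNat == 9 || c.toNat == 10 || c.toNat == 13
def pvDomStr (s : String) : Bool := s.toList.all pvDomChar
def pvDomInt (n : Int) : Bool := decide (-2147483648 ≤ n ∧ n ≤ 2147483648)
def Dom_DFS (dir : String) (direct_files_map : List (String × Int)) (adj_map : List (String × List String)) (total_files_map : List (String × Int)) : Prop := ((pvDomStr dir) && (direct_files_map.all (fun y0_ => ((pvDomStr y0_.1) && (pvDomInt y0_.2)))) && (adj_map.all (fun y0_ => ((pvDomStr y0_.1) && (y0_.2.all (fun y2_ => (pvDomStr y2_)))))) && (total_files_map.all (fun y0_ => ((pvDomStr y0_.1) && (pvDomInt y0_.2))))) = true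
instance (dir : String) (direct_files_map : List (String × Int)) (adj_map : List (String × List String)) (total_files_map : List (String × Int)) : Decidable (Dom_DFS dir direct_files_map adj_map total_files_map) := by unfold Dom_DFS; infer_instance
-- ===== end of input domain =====

-- B replaces A's memoizing recursive DFS by an iterative frontier walk with path-multiplicity
-- counts (alternative decomposition); equivalence is about the RETURN value only — A fills
-- total_files_map in place, B never writes to it.


-- ===== PORT A =====
-- state-passing transliteration of A's recursion; the Nat argument is a fuel guard only:
-- on every input admitted by Pre_DFS the recursion depth is < adj_map.length + 1
-- (proved below), so the fuel never runs out there.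
def goA (dfm : List (String × Int)) (am : List (String × List String)) :
    Nat → String → PySem.Dict String Int → Int × PySem.Dict String Int
  | 0, _, m => (0, m)
  | n+1, d, m =>
    match PySem.Dict.get? m d with
    | some v => (v, m)                     -- if dir in total_files_map: return total_files_map[dir]
    | none =>
      let total : Int := 0
      let total : Int :=                   -- if dir in direct_files_map: total += ...
        match PySem.Dict.get? (PySem.Dict.mk dfm) d with
        | some v => total + v
        | none => total
      let r : Int × PySem.Dict String Int :=
        match PySem.Dict.get? (PySem.Dict.mk am) d with
        | some subs =>                     -- for subdir in adj_map[dir]: total += DFS(subdir, …)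
          subs.foldl (fun p c =>
            let q := goA dfm am n c p.2
            (p.1 + q.1, q.2)) (total, m)
        | none => (total, m)
      (r.1, PySem.Dict.insert r.2 d r.1)   -- total_files_map[dir] = total

def DFS (dir : String) (direct_files_map : List (String × Int)) (adj_map : List (String × List String)) (total_files_map : List (String × Int)) : Int :=
  (goA direct_files_map adj_map (adj_map.length + 1) dir (PySem.Dict.mk total_files_map)).1

-- ===== PORT B =====
-- one frontier entry (v, c): v a directory, c the number of uncached paths reaching it
def bStep (dfm : List (String × Int)) (am : List (String × List String)) (tfm : List (String × Int))
    (p : Int × PySem.Dict String Int) (vc : String × Int) : Int × PySem.Dict String Int :=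
  match PySem.Dict.get? (PySem.Dict.mk tfm) vc.1 with
  | some tv => (p.1 + vc.2 * tv, p.2)
  | none =>
    (p.1 + vc.2 * ((PySem.Dict.get? (PySem.Dict.mk dfm) vc.1).getD 0),
     ((PySem.Dict.get? (PySem.Dict.mk am) vc.1).getD []).foldl
       (fun nx ch => PySem.Dict.insert nx ch (PySem.Dict.getD nx ch 0 + vc.2)) p.2)

-- 'while frontier:' with a fuel guard; on Pre_DFS inputs the frontier empties before the fuel does
def bLoop (dfm : List (String × Int)) (am : List (String × List String)) (tfm : List (String × Int)) :
    Nat → Int → PySem.Dict String Int → Int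
  | 0, total, _ => total
  | n+1, total, frontier =>
    if frontier.items = [] then total
    else
      let p := frontier.items.foldl (bStep dfm am tfm) (total, PySem.Dict.mk [])
      bLoop dfm am tfm n p.1 p.2

def DFS_alt (dir : String) (direct_files_map : List (String × Int)) (adj_map : List (String × List String)) (total_files_map : List (String × Int)) : Int :=
  bLoop direct_files_map adj_map total_files_map (adj_map.length + 2) 0 (PySem.Dict.mk [(dir, 1)])

-- ===== PRECONDITION & SPEC =====
-- lpath am tfm n v: length (capped at n) of the longest directed path out of v in the input
-- graph described by adj_map, walking only through directories not already cached in
-- total_files_map — a property of the input graph, not a run of either algorithm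
def lpath (am : List (String × List String)) (tfm : List (String × Int)) : Nat → String → Nat
  | 0, _ => 0
  | n+1, v =>
    match PySem.Dict.get? (PySem.Dict.mk tfm) v with
    | some _ => 0
    | none =>
      match PySem.Dict.get? (PySem.Dict.mk am) v with
      | none => 0
      | some subs => 1 + (subs.map (lpath am tfm n)).foldl max 0

-- Pre_ excludes exactly the inputs on which A raises (RecursionError): those where a directed
-- cycle of uncached directories is reachable from dir, stated as a longest-path bound at dir
-- (on an acyclic reachable subgraph every such path visits distinct adj_map keys, hence the
-- bound adj_map.length; a reachable cycle makes the capped longest path exceed any bound).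
def Pre_DFS (dir : String) (direct_files_map : List (String × Int)) (adj_map : List (String × List String)) (total_files_map : List (String × Int)) : Prop :=
  lpath adj_map total_files_map (adj_map.length + 1) dir ≤ adj_map.length
instance (dir : String) (direct_files_map : List (String × Int)) (adj_map : List (String × List String)) (total_files_map : List (String × Int)) : Decidable (Pre_DFS dir direct_files_map adj_map total_files_map) := by unfold Pre_DFS; infer_instance

def pvWitness_DFS : String × (List (String × Int)) × (List (String × List String)) × (List (String × Int)) :=
  ("/", [("/", 10), ("a", 2)], [("/", ["a", "b"]), ("a", [])], [("b", 7)])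

def Spec_DFS (dir : String) (direct_files_map : List (String × Int)) (adj_map : List (String × List String)) (total_files_map : List (String × Int)) (out : Int) : Prop := out = DFS_alt dir direct_files_map adj_map total_files_map
instance (dir : String) (direct_files_map : List (String × Int)) (adj_map : List (String × List String)) (total_files_map : List (String × Int)) (out : Int) : Decidable (Spec_DFS dir direct_files_map adj_map total_files_map out) := by unfold Spec_DFS; infer_instance

-- ===== CLAIM (what is proved, stated in full; the proofs are below) =====
def Claim_equal_DFS : Prop := ∀ (dir : String) (direct_files_map : List (String × Int)) (adj_map : List (String × List String)) (total_files_map : List (String × Int)), Dom_DFS dir direct_files_map adj_map total_files_map → Pre_DFS dir direct_files_map adj_map total_files_map → Spec_DFS dir direct_files_map adj_map total_files_map (DFS dir direct_files_map adj_map total_files_map)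

-- ===== LEMMAS AND PROOFS =====

lemma foldl_max_init_le (l : List Nat) (a : Nat) : a ≤ l.foldl max a := by
  induction l generalizing a with
  | nil => exact le_rfl
  | cons y ys ih => exact le_trans (le_max_left a y) (ih (max a y))

lemma le_foldl_max (l : List Nat) (a x : Nat) (h : x ∈ l) : x ≤ l.foldl max a := by
  induction l generalizing a with
  | nil => cases h
  | cons y ys ih =>
    rcases List.mem_cons.1 h with rfl | h'
    · exact le_trans (le_max_right a x) (foldl_max_init_le ys (max a x))
    · exact ih _ h'

-- one-step unfoldings of lpath that do not unfold the recursive occurrences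
lemma lpath_succ_cached (am : List (String × List String)) (tfm : List (String × Int)) (n : Nat)
    (v : String) (w : Int) (ht : PySem.Dict.get? (PySem.Dict.mk tfm) v = some w) :
    lpath am tfm (n+1) v = 0 := by
  have h0 : lpath am tfm (n+1) v = match PySem.Dict.get? (PySem.Dict.mk tfm) v with
    | some _ => 0
    | none =>
      match PySem.Dict.get? (PySem.Dict.mk am) v with
      | none => 0
      | some subs => 1 + (subs.map (lpath am tfm n)).foldl max 0 := rfl
  rw [h0, ht]

lemma lpath_succ_nonkey (am : List (String × List String)) (tfm : List (String × Int)) (n : Nat)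
    (v : String) (ht : PySem.Dict.get? (PySem.Dict.mk tfm) v = none)
    (hg : PySem.Dict.get? (PySem.Dict.mk am) v = none) :
    lpath am tfm (n+1) v = 0 := by
  have h0 : lpath am tfm (n+1) v = match PySem.Dict.get? (PySem.Dict.mk tfm) v with
    | some _ => 0
    | none =>
      match PySem.Dict.get? (PySem.Dict.mk am) v with
      | none => 0
      | some subs => 1 + (subs.map (lpath am tfm n)).foldl max 0 := rfl
  rw [h0, ht, hg]

lemma lpath_succ_key (am : List (String × List String)) (tfm : List (String × Int)) (n : Nat)
    (v : String) (subs : List String) (ht : PySem.Dict.get? (PySem.Dict.mk tfm) v = none)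
    (hg : PySem.Dict.get? (PySem.Dict.mk am) v = some subs) :
    lpath am tfm (n+1) v = 1 + (subs.map (lpath am tfm n)).foldl max 0 := by
  have h0 : lpath am tfm (n+1) v = match PySem.Dict.get? (PySem.Dict.mk tfm) v with
    | some _ => 0
    | none =>
      match PySem.Dict.get? (PySem.Dict.mk am) v with
      | none => 0
      | some subs => 1 + (subs.map (lpath am tfm n)).foldl max 0 := rfl
  rw [h0, ht, hg]

lemma lpath_stab (am : List (String × List String)) (tfm : List (String × Int)) :
    ∀ n v, lpath am tfm (n+1) v ≤ n → lpath am tfm (n+2) v = lpath am tfm (n+1) v := by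
  intro n
  induction n with
  | zero =>
    intro v h
    cases ht : PySem.Dict.get? (PySem.Dict.mk tfm) v with
    | some w =>
      show lpath am tfm (1+1) v = lpath am tfm (0+1) v
      rw [lpath_succ_cached am tfm 1 v w ht, lpath_succ_cached am tfm 0 v w ht]
    | none =>
      cases hg : PySem.Dict.get? (PySem.Dict.mk am) v with
      | none =>
        show lpath am tfm (1+1) v = lpath am tfm (0+1) v
        rw [lpath_succ_nonkey am tfm 1 v ht hg, lpath_succ_nonkey am tfm 0 v ht hg]
      | some subs =>
        rw [show (0:Nat)+1 = 0+1 from rfl, lpath_succ_key am tfm 0 v subs ht hg] at h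
        omega
  | succ m ih =>
    intro v h
    cases ht : PySem.Dict.get? (PySem.Dict.mk tfm) v with
    | some w =>
      show lpath am tfm ((m+2)+1) v = lpath am tfm ((m+1)+1) v
      rw [lpath_succ_cached am tfm (m+2) v w ht, lpath_succ_cached am tfm (m+1) v w ht]
    | none =>
      cases hg : PySem.Dict.get? (PySem.Dict.mk am) v with
      | none =>
        show lpath am tfm ((m+2)+1) v = lpath am tfm ((m+1)+1) v
        rw [lpath_succ_nonkey am tfm (m+2) v ht hg, lpath_succ_nonkey am tfm (m+1) v ht hg]
      | some subs =>
        rw [show m+1+1 = (m+1)+1 from rfl, lpath_succ_key am tfm (m+1) v subs ht hg] at h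
        have h' : (subs.map (lpath am tfm (m+1))).foldl max 0 ≤ m := by omega
        have hmap : subs.map (lpath am tfm (m+2)) = subs.map (lpath am tfm (m+1)) := by
          apply List.map_congr_left
          intro c hc
          apply ih
          exact le_trans (le_foldl_max _ 0 _ (List.mem_map_of_mem hc)) h'
        show lpath am tfm ((m+2)+1) v = lpath am tfm ((m+1)+1) v
        rw [lpath_succ_key am tfm (m+2) v subs ht hg, lpath_succ_key am tfm (m+1) v subs ht hg, hmap]

-- rank of a node: its capped longest uncached path (the fuel both ports' proofs count down)
def rk (am : List (String × List String)) (tfm : List (String × Int)) (v : String) : Nat :=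
  lpath am tfm (am.length + 1) v

-- children of d under adj_map (empty when d is not a key)
def childs (am : List (String × List String)) (d : String) : List String :=
  (PySem.Dict.get? (PySem.Dict.mk am) d).getD []

-- the bound 'rk ≤ adj_map.length' is forward-invariant along uncached edges, with a strict
-- rank decrease: this is all the recursions below need
lemma child_bound (am : List (String × List String)) (tfm : List (String × Int)) (v c : String)
    (ht : PySem.Dict.get? (PySem.Dict.mk tfm) v = none)
    (hb : rk am tfm v ≤ am.length) (hc : c ∈ childs am v) :
    rk am tfm c < rk am tfm v ∧ rk am tfm c ≤ am.length := by
  unfold childs at hc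
  cases hg : PySem.Dict.get? (PySem.Dict.mk am) v with
  | none => rw [hg] at hc; simp at hc
  | some subs =>
    rw [hg] at hc; simp only [Option.getD_some] at hc
    obtain ⟨m, hm⟩ : ∃ m, am.length = m + 1 := by
      cases ham : am with
      | nil => rw [ham] at hg; simp [PySem.Dict.get?] at hg
      | cons p rest => exact ⟨rest.length, by simp⟩
    have hexp : lpath am tfm (am.length + 1) v
        = 1 + (subs.map (lpath am tfm am.length)).foldl max 0 :=
      lpath_succ_key am tfm am.length v subs ht hg
    have hfle : (subs.map (lpath am tfm am.length)).foldl max 0 ≤ m := by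
      have := hb
      unfold rk at this
      rw [hexp] at this
      omega
    have hcle : lpath am tfm am.length c ≤ m :=
      le_trans (le_foldl_max _ 0 _ (List.mem_map_of_mem hc)) hfle
    have hstab : lpath am tfm (am.length + 1) c = lpath am tfm am.length c := by
      rw [hm] at hcle ⊢
      exact lpath_stab am tfm m c hcle
    constructor
    · show lpath am tfm (am.length + 1) c < lpath am tfm (am.length + 1) v
      rw [hstab, hexp]
      have := le_foldl_max (subs.map (lpath am tfm am.length)) 0 _ (List.mem_map_of_mem hc)
      omega
    · show lpath am tfm (am.length + 1) c ≤ am.length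
      rw [hstab]
      omega

-- the common pure value both programs compute: memoized value if cached, else direct files
-- plus the children's values (fuel-indexed; stable once the fuel exceeds rk)
def gF (dfm : List (String × Int)) (am : List (String × List String)) (tfm : List (String × Int)) :
    Nat → String → Int
  | 0, _ => 0
  | n+1, d =>
    match PySem.Dict.get? (PySem.Dict.mk tfm) d with
    | some v => v
    | none => ((PySem.Dict.get? (PySem.Dict.mk dfm) d).getD 0) + ((childs am d).map (gF dfm am tfm n)).sum

lemma gF_succ (dfm : List (String × Int)) (am : List (String × List String)) (tfm : List (String × Int))
    (n : Nat) (d : String) :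
    gF dfm am tfm (n+1) d =
      (match PySem.Dict.get? (PySem.Dict.mk tfm) d with
       | some v => v
       | none => ((PySem.Dict.get? (PySem.Dict.mk dfm) d).getD 0) + ((childs am d).map (gF dfm am tfm n)).sum) := rfl

lemma gF_succ_none (dfm : List (String × Int)) (am : List (String × List String)) (tfm : List (String × Int))
    (n : Nat) (d : String) (h : PySem.Dict.get? (PySem.Dict.mk tfm) d = none) :
    gF dfm am tfm (n+1) d =
      ((PySem.Dict.get? (PySem.Dict.mk dfm) d).getD 0) + ((childs am d).map (gF dfm am tfm n)).sum := by
  rw [gF_succ, h]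

lemma gF_succ_some (dfm : List (String × Int)) (am : List (String × List String)) (tfm : List (String × Int))
    (n : Nat) (d : String) (v : Int) (h : PySem.Dict.get? (PySem.Dict.mk tfm) d = some v) :
    gF dfm am tfm (n+1) d = v := by
  rw [gF_succ, h]

lemma g_stab (dfm : List (String × Int)) (am : List (String × List String)) (tfm : List (String × Int)) :
    ∀ n d, rk am tfm d ≤ am.length → rk am tfm d < n →
      gF dfm am tfm (n+1) d = gF dfm am tfm n d := by
  intro n
  induction n with
  | zero => intro d _ h; omega
  | succ m ih =>
    intro d hb hd
    show gF dfm am tfm (m+2) d = gF dfm am tfm (m+1) d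
    simp only [gF]
    cases ht : PySem.Dict.get? (PySem.Dict.mk tfm) d with
    | some v => rfl
    | none =>
      simp only
      congr 1
      congr 1
      apply List.map_congr_left
      intro c hc
      obtain ⟨h1, h2⟩ := child_bound am tfm d c ht hb hc
      exact ih c h2 (by omega)

lemma g_fuel (dfm : List (String × Int)) (am : List (String × List String)) (tfm : List (String × Int))
    (n n' : Nat) (d : String) (hb : rk am tfm d ≤ am.length)
    (h1 : rk am tfm d < n) (h2 : rk am tfm d < n') : gF dfm am tfm n d = gF dfm am tfm n' d := by
  have key : ∀ (k b : Nat), rk am tfm d < b → gF dfm am tfm (b + k) d = gF dfm am tfm b d := by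
    intro k
    induction k with
    | zero => intro b _; rfl
    | succ j ih =>
      intro b hbd
      have : b + (j + 1) = (b + j) + 1 := by omega
      rw [this, g_stab dfm am tfm (b + j) d hb (by omega), ih b hbd]
  have e1 := key (n - (rk am tfm d + 1)) (rk am tfm d + 1) (by omega)
  have e2 := key (n' - (rk am tfm d + 1)) (rk am tfm d + 1) (by omega)
  rw [show rk am tfm d + 1 + (n - (rk am tfm d + 1)) = n by omega] at e1
  rw [show rk am tfm d + 1 + (n' - (rk am tfm d + 1)) = n' by omega] at e2
  rw [e1, e2]

-- A-side memo invariant: the memo extends tfm and every entry carries the pure value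
def InvA (dfm : List (String × Int)) (am : List (String × List String)) (tfm : List (String × Int))
    (m : PySem.Dict String Int) : Prop :=
  (∀ k v, PySem.Dict.get? (PySem.Dict.mk tfm) k = some v → PySem.Dict.get? m k = some v) ∧
  (∀ k v, PySem.Dict.get? m k = some v → v = gF dfm am tfm (am.length + 1) k)

lemma goA_correct (dfm : List (String × Int)) (am : List (String × List String)) (tfm : List (String × Int)) :
    ∀ n d m, InvA dfm am tfm m → rk am tfm d ≤ am.length → rk am tfm d < n →
      (goA dfm am n d m).1 = gF dfm am tfm (am.length + 1) d ∧ InvA dfm am tfm (goA dfm am n d m).2 := by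
  intro n
  induction n with
  | zero => intro d m _ _ h; omega
  | succ k ih =>
    intro d m hinv hb hd
    cases hm : PySem.Dict.get? m d with
    | some v =>
      have hval := hinv.2 d v hm
      simp only [goA, hm]
      exact ⟨hval, hinv⟩
    | none =>
      have htfm : PySem.Dict.get? (PySem.Dict.mk tfm) d = none := by
        cases h : PySem.Dict.get? (PySem.Dict.mk tfm) d with
        | none => rfl
        | some v => rw [hinv.1 d v h] at hm; cases hm
      have ht0 : (match PySem.Dict.get? (PySem.Dict.mk dfm) d with
          | some v => (0 : Int) + v | none => (0 : Int)) =
          (PySem.Dict.get? (PySem.Dict.mk dfm) d).getD 0 := by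
        cases PySem.Dict.get? (PySem.Dict.mk dfm) d with
        | some v => simp
        | none => rfl
      have hins : ∀ (m2 : PySem.Dict String Int) (w : Int), InvA dfm am tfm m2 →
          w = gF dfm am tfm (am.length + 1) d → InvA dfm am tfm (m2.insert d w) := by
        intro m2 w hinv2 hw
        constructor
        · intro k' v hv
          have hne : k' ≠ d := by
            intro h; subst h; rw [htfm] at hv; cases hv
          rw [PySem.Dict.get?_insert, if_neg hne]
          exact hinv2.1 k' v hv
        · intro k' v hv
          rw [PySem.Dict.get?_insert] at hv
          by_cases hk : k' = d
          · rw [if_pos hk] at hv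
            cases hv
            rw [hk, hw]
          · rw [if_neg hk] at hv
            exact hinv2.2 k' v hv
      cases hadj : PySem.Dict.get? (PySem.Dict.mk am) d with
      | none =>
        have hg : gF dfm am tfm (am.length + 1) d =
            (PySem.Dict.get? (PySem.Dict.mk dfm) d).getD 0 := by
          rw [gF_succ, htfm]
          simp only [childs, hadj, Option.getD_none, List.map_nil, List.sum_nil, add_zero]
        simp only [goA, hm, hadj, ht0]
        exact ⟨hg.symm, hins m ((PySem.Dict.get? (PySem.Dict.mk dfm) d).getD 0) hinv hg.symm⟩
      | some subs =>
        have hsubs : ∀ c ∈ subs, rk am tfm c ≤ am.length ∧ rk am tfm c < k := by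
          intro c hc
          obtain ⟨h1, h2⟩ := child_bound am tfm d c htfm hb (by simp [childs, hadj, hc])
          exact ⟨h2, by omega⟩
        have hfold : ∀ (cs : List String), (∀ c ∈ cs, rk am tfm c ≤ am.length ∧ rk am tfm c < k) →
            ∀ (t : Int) (m' : PySem.Dict String Int), InvA dfm am tfm m' →
            ((cs.foldl (fun p c => (p.1 + (goA dfm am k c p.2).1, (goA dfm am k c p.2).2)) (t, m')).1
               = t + (cs.map (gF dfm am tfm (am.length + 1))).sum)
            ∧ InvA dfm am tfm
                (cs.foldl (fun p c => (p.1 + (goA dfm am k c p.2).1, (goA dfm am k c p.2).2)) (t, m')).2 := by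
          intro cs
          induction cs with
          | nil => intro _ t m' hinv'; simpa using hinv'
          | cons c cs' ihs =>
            intro hr t m' hinv'
            simp only [List.foldl_cons]
            obtain ⟨h1, h2⟩ := ih c m' hinv' (hr c (by simp)).1 (hr c (by simp)).2
            obtain ⟨h3, h4⟩ := ihs (fun c' hc' => hr c' (by simp [hc']))
              (t + (goA dfm am k c m').1) (goA dfm am k c m').2 h2
            refine ⟨?_, h4⟩
            rw [h3, h1]
            simp only [List.map_cons, List.sum_cons]
            ring
        have hmap : subs.map (gF dfm am tfm am.length) =
            subs.map (gF dfm am tfm (am.length + 1)) := by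
          apply List.map_congr_left
          intro c hc
          obtain ⟨h1, h2⟩ := child_bound am tfm d c htfm hb (by simp [childs, hadj, hc])
          exact g_fuel dfm am tfm am.length (am.length + 1) c h2 (by omega) (by omega)
        have hg : gF dfm am tfm (am.length + 1) d =
            (PySem.Dict.get? (PySem.Dict.mk dfm) d).getD 0
              + (subs.map (gF dfm am tfm (am.length + 1))).sum := by
          rw [gF_succ, htfm]
          simp only [childs, hadj, Option.getD_some]
          rw [hmap]
        obtain ⟨hf1, hf2⟩ := hfold subs hsubs ((PySem.Dict.get? (PySem.Dict.mk dfm) d).getD 0) m hinv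
        simp only [goA, hm, hadj, ht0]
        rw [hf1]
        exact ⟨hg.symm, hins _ _ hf2 hg.symm⟩

-- B-side: weighted sum of the pure values over a frontier
def wsum (f : String → Int) (l : List (String × Int)) : Int := (l.map (fun p => p.2 * f p.1)).sum

lemma items_insert_cons_of_ne (a : String) (b : Int) (rest : List (String × Int)) (k : String) (w : Int)
    (hne : k ≠ a) :
    ((PySem.Dict.mk ((a, b) :: rest)).insert k w).items = (a, b) :: ((PySem.Dict.mk rest).insert k w).items := by
  have hab : ¬ a = k := fun h => hne h.symm
  have hba : (a == k) = false := by simp [hab]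
  have hcc : (PySem.Dict.mk ((a, b) :: rest)).contains k = (PySem.Dict.mk rest).contains k := by
    simp [PySem.Dict.contains, hba]
  simp only [PySem.Dict.insert, hcc]
  cases hc : (PySem.Dict.mk rest).contains k with
  | true => simp only [if_true, List.map_cons, hba, Bool.false_eq_true, if_false]
  | false => simp only [Bool.false_eq_true, if_false, List.cons_append]

lemma wsum_bump (f : String → Int) (nx : PySem.Dict String Int) (hnd : nx.keys.Nodup) (k : String) (c : Int) :
    wsum f (nx.insert k (nx.getD k 0 + c)).items = wsum f nx.items + c * f k := by
  obtain ⟨l⟩ := nx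
  induction l with
  | nil =>
    simp [wsum, PySem.Dict.insert, PySem.Dict.contains, PySem.Dict.getD, PySem.Dict.get?]
  | cons p rest ih =>
    obtain ⟨a, b⟩ := p
    by_cases hk : k = a
    · subst hk
      have hcon : (PySem.Dict.mk ((k, b) :: rest)).contains k = true := by
        simp [PySem.Dict.contains]
      have hget : (PySem.Dict.mk ((k, b) :: rest)).getD k 0 = b := by
        simp [PySem.Dict.getD, PySem.Dict.get?_mk_cons]
      have hkeys : k ∉ rest.map Prod.fst := by
        have h2 := hnd
        simp only [PySem.Dict.keys, List.map_cons, List.nodup_cons] at h2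
        exact fun h => h2.1 (by simpa using h)
      have hmap : rest.map (fun p => if (p.1 == k) = true then (k, b + c) else p) = rest := by
        conv_rhs => rw [← List.map_id rest]
        apply List.map_congr_left
        intro p hp
        have hp1 : p.1 ≠ k := fun h => hkeys (by rw [← h]; exact List.mem_map_of_mem hp)
        simp [hp1]
      simp only [PySem.Dict.insert, hcon, if_true, hget, List.map_cons, beq_self_eq_true, hmap]
      simp only [wsum, List.map_cons, List.sum_cons]
      ring
    · have hab : ¬ a = k := fun h => hk h.symm
      have hgd : (PySem.Dict.mk ((a, b) :: rest)).getD k 0 = (PySem.Dict.mk rest).getD k 0 := by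
        simp [PySem.Dict.getD, PySem.Dict.get?_mk_cons, hab]
      rw [hgd, items_insert_cons_of_ne a b rest k _ hk]
      have hnd' : (PySem.Dict.mk rest).keys.Nodup := by
        have h2 := hnd
        simp only [PySem.Dict.keys, List.map_cons, List.nodup_cons] at h2
        exact h2.2
      have h3 := ih hnd'
      simp only [wsum, List.map_cons, List.sum_cons] at h3 ⊢
      rw [h3]
      ring

lemma inner_fold (f : String → Int) (c : Int) :
    ∀ (chs : List String) (nx : PySem.Dict String Int), nx.keys.Nodup →
      (wsum f (chs.foldl (fun nx ch => PySem.Dict.insert nx ch (PySem.Dict.getD nx ch 0 + c)) nx).items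
          = wsum f nx.items + c * (chs.map f).sum) ∧
        (chs.foldl (fun nx ch => PySem.Dict.insert nx ch (PySem.Dict.getD nx ch 0 + c)) nx).keys.Nodup ∧
        (∀ w ∈ (chs.foldl (fun nx ch => PySem.Dict.insert nx ch (PySem.Dict.getD nx ch 0 + c)) nx).keys,
          w ∈ nx.keys ∨ w ∈ chs) := by
  intro chs
  induction chs with
  | nil =>
    intro nx hnd
    exact ⟨by simp, hnd, fun w hw => Or.inl hw⟩
  | cons ch chs' ihc =>
    intro nx hnd
    simp only [List.foldl_cons]
    obtain ⟨e1, e2, e3⟩ := ihc (nx.insert ch (nx.getD ch 0 + c))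
      (PySem.Dict.nodup_keys_insert nx ch _ hnd)
    refine ⟨?_, e2, ?_⟩
    · rw [e1, wsum_bump f nx hnd ch c]
      simp only [List.map_cons, List.sum_cons]
      ring
    · intro w hw
      rcases e3 w hw with h | h
      · rw [PySem.Dict.mem_keys_insert] at h
        rcases h with h | h
        · exact Or.inr (by simp [h])
        · exact Or.inl h
      · exact Or.inr (by simp [h])

lemma step_fold (dfm : List (String × Int)) (am : List (String × List String)) (tfm : List (String × Int))
    (n : Nat) :
    ∀ (pend : List (String × Int)), (∀ p ∈ pend, rk am tfm p.1 ≤ am.length ∧ rk am tfm p.1 < n + 1) →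
      ∀ (acc : Int × PySem.Dict String Int), acc.2.keys.Nodup →
        (∀ w ∈ acc.2.keys, rk am tfm w ≤ am.length ∧ rk am tfm w < n) →
        ((pend.foldl (bStep dfm am tfm) acc).1
            + wsum (gF dfm am tfm (am.length + 1)) (pend.foldl (bStep dfm am tfm) acc).2.items
          = acc.1 + wsum (gF dfm am tfm (am.length + 1)) acc.2.items
            + wsum (gF dfm am tfm (am.length + 1)) pend) ∧
        (pend.foldl (bStep dfm am tfm) acc).2.keys.Nodup ∧
        (∀ w ∈ (pend.foldl (bStep dfm am tfm) acc).2.keys, rk am tfm w ≤ am.length ∧ rk am tfm w < n) := by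
  intro pend
  induction pend with
  | nil =>
    intro _ acc hnd hrk
    refine ⟨?_, hnd, hrk⟩
    simp [wsum]
  | cons vc pend' ihp =>
    intro hr acc hnd hrk
    obtain ⟨v, c⟩ := vc
    have hrv : rk am tfm v ≤ am.length ∧ rk am tfm v < n + 1 := hr (v, c) (by simp)
    simp only [List.foldl_cons]
    cases htv : PySem.Dict.get? (PySem.Dict.mk tfm) v with
    | some tv =>
      have hstep : bStep dfm am tfm acc (v, c) = (acc.1 + c * tv, acc.2) := by
        simp only [bStep, htv]
      rw [hstep]
      obtain ⟨e1, e2, e3⟩ := ihp (fun p hp => hr p (by simp [hp])) (acc.1 + c * tv, acc.2) hnd hrk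
      refine ⟨?_, e2, e3⟩
      rw [e1]
      have hgv : gF dfm am tfm (am.length + 1) v = tv := gF_succ_some dfm am tfm am.length v tv htv
      simp only [wsum, List.map_cons, List.sum_cons, hgv]
      ring
    | none =>
      have hstep : bStep dfm am tfm acc (v, c) =
          (acc.1 + c * ((PySem.Dict.get? (PySem.Dict.mk dfm) v).getD 0),
           ((PySem.Dict.get? (PySem.Dict.mk am) v).getD []).foldl
             (fun nx ch => PySem.Dict.insert nx ch (PySem.Dict.getD nx ch 0 + c)) acc.2) := by
        simp only [bStep, htv]
      rw [hstep]
      obtain ⟨f1, f2, f3⟩ := inner_fold (gF dfm am tfm (am.length + 1)) c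
        ((PySem.Dict.get? (PySem.Dict.mk am) v).getD []) acc.2 hnd
      have hrk2 : ∀ w ∈ (((PySem.Dict.get? (PySem.Dict.mk am) v).getD []).foldl
          (fun nx ch => PySem.Dict.insert nx ch (PySem.Dict.getD nx ch 0 + c)) acc.2).keys,
          rk am tfm w ≤ am.length ∧ rk am tfm w < n := by
        intro w hw
        rcases f3 w hw with h | h
        · exact hrk w h
        · obtain ⟨h1, h2⟩ := child_bound am tfm v w htv hrv.1 (by simpa [childs] using h)
          exact ⟨h2, by omega⟩
      obtain ⟨e1, e2, e3⟩ := ihp (fun p hp => hr p (by simp [hp]))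
        (acc.1 + c * ((PySem.Dict.get? (PySem.Dict.mk dfm) v).getD 0),
         ((PySem.Dict.get? (PySem.Dict.mk am) v).getD []).foldl
           (fun nx ch => PySem.Dict.insert nx ch (PySem.Dict.getD nx ch 0 + c)) acc.2) f2 hrk2
      refine ⟨?_, e2, e3⟩
      rw [e1, f1]
      have hgv : gF dfm am tfm (am.length + 1) v =
          (PySem.Dict.get? (PySem.Dict.mk dfm) v).getD 0
            + ((childs am v).map (gF dfm am tfm (am.length + 1))).sum := by
        rw [gF_succ_none dfm am tfm am.length v htv]
        congr 1
        congr 1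
        apply List.map_congr_left
        intro ch hch
        obtain ⟨h1, h2⟩ := child_bound am tfm v ch htv hrv.1 hch
        exact g_fuel dfm am tfm am.length (am.length + 1) ch h2 (by omega) (by omega)
      simp only [wsum, List.map_cons, List.sum_cons, hgv, childs]
      ring

lemma bLoop_correct (dfm : List (String × Int)) (am : List (String × List String)) (tfm : List (String × Int)) :
    ∀ n (total : Int) (frontier : PySem.Dict String Int), frontier.keys.Nodup →
      (∀ v ∈ frontier.keys, rk am tfm v ≤ am.length ∧ rk am tfm v < n) →
      bLoop dfm am tfm n total frontier = total + wsum (gF dfm am tfm (am.length + 1)) frontier.items := by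
  intro n
  induction n with
  | zero =>
    intro total frontier hnd hrk
    cases hitems : frontier.items with
    | nil => simp [bLoop, wsum]
    | cons p rest =>
      exfalso
      have : p.1 ∈ frontier.keys := by
        simp [PySem.Dict.keys, hitems]
      have := (hrk p.1 this).2
      omega
  | succ n ihn =>
    intro total frontier hnd hrk
    by_cases hitems : frontier.items = []
    · simp [bLoop, hitems, wsum]
    · simp only [bLoop, if_neg hitems]
      obtain ⟨e1, e2, e3⟩ := step_fold dfm am tfm n frontier.items
        (fun p hp => hrk p.1 (by simp [PySem.Dict.keys]; exact ⟨p.2, by simpa using hp⟩))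
        (total, PySem.Dict.mk []) (by simp [PySem.Dict.keys]) (by simp [PySem.Dict.keys])
      rw [ihn _ _ e2 e3, e1]
      simp [wsum]

-- ===== VERDICT (by name: the statement is the Claim_ definition above) =====
theorem DFS_spec : Claim_equal_DFS := by
  intro dir dfm am tfm _hdom hpre
  have hb : rk am tfm dir ≤ am.length := hpre
  show DFS dir dfm am tfm = DFS_alt dir dfm am tfm
  have hA : DFS dir dfm am tfm = gF dfm am tfm (am.length + 1) dir := by
    have hinv : InvA dfm am tfm (PySem.Dict.mk tfm) := by
      constructor
      · intro k v h; exact h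
      · intro k v h; rw [gF_succ, h]
    exact (goA_correct dfm am tfm (am.length + 1) dir (PySem.Dict.mk tfm) hinv hb (by omega)).1
  have hB : DFS_alt dir dfm am tfm = gF dfm am tfm (am.length + 1) dir := by
    have hr : ∀ v ∈ (PySem.Dict.mk [(dir, (1 : Int))]).keys,
        rk am tfm v ≤ am.length ∧ rk am tfm v < am.length + 2 := by
      intro v hv
      have hveq : v = dir := by simpa [PySem.Dict.keys] using hv
      subst hveq
      exact ⟨hb, by omega⟩
    have := bLoop_correct dfm am tfm (am.length + 2) 0 (PySem.Dict.mk [(dir, 1)])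
      (by simp [PySem.Dict.keys]) hr
    unfold DFS_alt
    rw [this]
    simp [wsum]
  rw [hA, hB]
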